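-- pv_equiv track=rewrite | github.com/vinalct/janus | src/janus/utils/logging.py | _redact_sensitive_path
-- ===== SOURCE A (Python) =====
-- REDACTED_VALUE = "***REDACTED***"
--
-- def _redact_sensitive_path(path: str) -> str:
--     parts = path.split("/")
--     for index, part in enumerate(parts[:-1]):
--         if part == "s" and index > 0 and parts[index - 1] == "index.php":
--             parts[index + 1] = REDACTED_VALUE
--         if (
--             part == "public.php"
--             and index + 3 < len(parts)
--             and parts[index + 1 : index + 3] == ["dav", "files"]
--         ):
--             parts[index + 3] = REDACTED_VALUE
--     return "/".join(parts)
-- ===== SOURCE B (Python) =====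
-- REDACTED_VALUE = "***REDACTED***"
--
--
-- def _redact_sensitive_path(path: str) -> str:
--     # Sliding-window scan: a segment is redacted exactly when the previous
--     # segments form "index.php/s" (with the anchor itself not redacted) or
--     # "public.php/dav/files".
--     result = []
--     p3 = p2 = p1 = None          # previous three segments (original values)
--     r2 = r1 = False              # redaction flags of the two previous segments
--     for seg in path.split("/"):
--         red = (p2 == "index.php" and p1 == "s" and not r2) or (
--             p3 == "public.php" and p2 == "dav" and p1 == "files"
--         )
--         result.append(REDACTED_VALUE if red else seg)
--         p3, p2, p1 = p2, p1, seg
--         r2, r1 = r1, red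
--     return "/".join(result)
-- ===== Notes on version B (the rewrite author's own statement) =====
-- stated objective: alternative
-- what changed: Replaces A's in-place list mutation with index arithmetic (writing REDACTED at index+1/index+3 while iterating over a snapshot) by a single forward sliding-window scan that keeps the previous three original segments and the redaction flags of the previous two, and decides each output segment locally.
import Mathlib
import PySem

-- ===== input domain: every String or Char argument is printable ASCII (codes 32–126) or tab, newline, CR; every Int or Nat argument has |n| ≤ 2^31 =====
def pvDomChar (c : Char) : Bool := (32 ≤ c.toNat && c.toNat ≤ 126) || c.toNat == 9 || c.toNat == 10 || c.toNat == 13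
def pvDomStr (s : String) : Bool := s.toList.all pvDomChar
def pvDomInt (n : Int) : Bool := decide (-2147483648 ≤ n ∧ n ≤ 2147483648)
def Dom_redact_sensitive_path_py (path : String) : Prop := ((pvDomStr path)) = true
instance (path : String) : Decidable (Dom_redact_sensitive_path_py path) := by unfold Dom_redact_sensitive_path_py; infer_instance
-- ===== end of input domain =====

-- B replaces A's in-place mutation with index arithmetic by a one-pass sliding-window scan (alternative, same cost).

-- ===== PORT A =====
def pvRED : String := "***REDACTED***"

-- loop body of A's 'for index, part in enumerate(parts[:-1])'
def redactStepA (ps : List String) (ip : Int × String) : List String :=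
  let idx := ip.1
  let part := ip.2
  let ps1 := if part = "s" ∧ 0 < idx ∧ PySem.List.pyGetD ps (idx - 1) "" = "index.php"
             then PySem.List.pySetD ps (idx + 1) pvRED else ps
  if part = "public.php" ∧ idx + 3 < (ps1.length : Int) ∧
     PySem.List.slice ps1 (some (idx + 1)) (some (idx + 3)) = ["dav", "files"]
  then PySem.List.pySetD ps1 (idx + 3) pvRED else ps1

def redact_sensitive_path_py (path : String) : String :=
  let parts := ((PySem.Str.split? path "/").getD [])
  PySem.Str.join "/"
    ((PySem.List.enumerate (PySem.List.slice parts none (some (-1))) 0).foldl redactStepA parts)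

-- ===== PORT B =====
-- loop of B: sliding window of the three previous original segments (p3 p2 p1)
-- and the redaction flags of the two previous segments (r2 r1)
def redactGo : List String → Option String → Option String → Option String → Bool → Bool → List String
  | [], _, _, _, _, _ => []
  | seg :: rest, p3, p2, p1, r2, r1 =>
    let red : Bool := (p2 == some "index.php" && p1 == some "s" && !r2)
                   || (p3 == some "public.php" && p2 == some "dav" && p1 == some "files")
    (if red then pvRED else seg) :: redactGo rest p2 p1 (some seg) r1 red

def redact_sensitive_path_py_alt (path : String) : String :=
  PySem.Str.join "/" (redactGo (((PySem.Str.split? path "/").getD [])) none none none false false)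

-- ===== PRECONDITION & SPEC =====
def Spec_redact_sensitive_path_py (path : String) (out : String) : Prop := out = redact_sensitive_path_py_alt path
instance (path : String) (out : String) : Decidable (Spec_redact_sensitive_path_py path out) := by unfold Spec_redact_sensitive_path_py; infer_instance

-- ===== CLAIM (what is proved, stated in full; the proofs are below) =====
def Claim_equal_redact_sensitive_path_py : Prop := ∀ (path : String), Dom_redact_sensitive_path_py path → Spec_redact_sensitive_path_py path (redact_sensitive_path_py path)

-- ===== LEMMAS AND PROOFS =====

-- the redaction flag B computes for the next segment, as a function of the window
def pvRedB (p3 p2 p1 : Option String) (r2 : Bool) : Bool :=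
  (p2 == some "index.php" && p1 == some "s" && !r2)
  || (p3 == some "public.php" && p2 == some "dav" && p1 == some "files")

def pvMark (b : Bool) (s : String) : String := if b then pvRED else s

-- the pending 'public.php/dav/files' pattern flag
def pvPub (x y : Option String) (z : String) : Bool :=
  x == some "public.php" && y == some "dav" && z == "files"

-- A's intermediate list state on the unprocessed suffix: the next segment is fully
-- decided, the two after it may already carry a pub-redaction, the rest is original
def pvMarkHead (xs : List String) (p3 p2 p1 : Option String) (r2 : Bool) : List String :=
  match xs with
  | [] => []
  | a :: t =>
    pvMark (pvRedB p3 p2 p1 r2) a ::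
    match t with
    | [] => []
    | b :: u =>
      pvMark (pvPub p2 p1 a) b ::
      match u with
      | [] => []
      | c :: v => pvMark (pvPub p1 (some a) b) c :: v

def pvCtxOK (emitted : List String) (p1 : Option String) (r1 : Bool) : Prop :=
  match p1 with
  | none => emitted = []
  | some v => emitted.getLast? = some (pvMark r1 v)

-- A's loop body, expressed locally on the unprocessed suffix l (ps = emitted ++ l,
-- prev = last emitted value if any)
def stepLocal (prev : Option String) (a : String) (l : List String) : List String :=
  let l1 := if a = "s" ∧ prev = some "index.php" then l.set 1 pvRED else l
  if a = "public.php" ∧ 3 < l1.length ∧ (l1.drop 1).take 2 = ["dav", "files"] then l1.set 3 pvRED else l1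

lemma set_append_right (E : List String) (l : List String) (n : Nat) (v : String) :
    (E ++ l).set (E.length + n) v = E ++ l.set n v := by
  induction E with
  | nil => simp
  | cons x E ih => simp [Nat.succ_add, ih]

lemma stepA_nil (a : String) (l : List String) :
    redactStepA l ((0 : Int), a) = stepLocal none a l := by
  unfold redactStepA stepLocal
  simp [pysem]

lemma stepA_append (e' : List String) (x a : String) (l : List String) :
    redactStepA ((e' ++ [x]) ++ l) (((e'.length : Int) + 1), a)
    = (e' ++ [x]) ++ stepLocal (some x) a l := by
  unfold redactStepA stepLocal
  dsimp only
  have hget : PySem.List.pyGetD ((e' ++ [x]) ++ l) ((e'.length : Int) + 1 - 1) "" = x := by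
    have h : ((e'.length : Int) + 1 - 1) = ((e'.length : Nat) : Int) := by omega
    rw [h, PySem.List.pyGetD_natCast]
    simp
  have hset1 : ∀ (l' : List String), PySem.List.pySetD ((e' ++ [x]) ++ l') ((e'.length : Int) + 1 + 1) pvRED
      = (e' ++ [x]) ++ l'.set 1 pvRED := by
    intro l'
    have h : ((e'.length : Int) + 1 + 1) = (((e' ++ [x]).length + 1 : Nat) : Int) := by simp only [List.length_append, List.length_cons, List.length_nil]; push_cast; ring
    rw [h, PySem.List.pySetD_natCast, set_append_right]
  have hset3 : ∀ (l' : List String), PySem.List.pySetD ((e' ++ [x]) ++ l') ((e'.length : Int) + 1 + 3) pvRED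
      = (e' ++ [x]) ++ l'.set 3 pvRED := by
    intro l'
    have h : ((e'.length : Int) + 1 + 3) = (((e' ++ [x]).length + 3 : Nat) : Int) := by simp only [List.length_append, List.length_cons, List.length_nil]; push_cast; ring
    rw [h, PySem.List.pySetD_natCast, set_append_right]
  have hslice : ∀ (l' : List String), PySem.List.slice ((e' ++ [x]) ++ l') (some ((e'.length : Int) + 1 + 1)) (some ((e'.length : Int) + 1 + 3))
      = (l'.drop 1).take 2 := by
    intro l'
    rw [PySem.List.slice_toNat _ (by omega) (by omega)]
    have h1 : ((e'.length : Int) + 1 + 1).toNat = (e' ++ [x]).length + 1 := by simp; omega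
    have h2 : ((e'.length : Int) + 1 + 3).toNat - ((e'.length : Int) + 1 + 1).toNat = 2 := by omega
    rw [h2, h1, List.drop_length_add_append]
  have hlen : ∀ (l' : List String), (((e' ++ [x]) ++ l').length : Int) = (e'.length : Int) + 1 + l'.length := by
    intro l'; simp; ring
  have hcond1 : (a = "s" ∧ (0:Int) < (e'.length : Int) + 1 ∧ PySem.List.pyGetD ((e' ++ [x]) ++ l) ((e'.length : Int) + 1 - 1) "" = "index.php")
      ↔ (a = "s" ∧ some x = some "index.php") := by
    rw [hget]
    constructor
    · rintro ⟨h1, _, h3⟩; exact ⟨h1, by rw [h3]⟩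
    · rintro ⟨h1, h3⟩; exact ⟨h1, by positivity, by injection h3⟩
  by_cases hc1 : a = "s" ∧ some x = some "index.php"
  · rw [if_pos (hcond1.mpr hc1), if_pos hc1, hset1]
    have hns : ¬ (a = "public.php" ∧ 3 < (l.set 1 pvRED).length ∧ ((l.set 1 pvRED).drop 1).take 2 = ["dav", "files"]) := by
      rintro ⟨ha, _, _⟩; exact absurd (ha ▸ hc1.1) (by decide)
    have hns' : ¬ (a = "public.php" ∧ (e'.length : Int) + 1 + 3 < (((e' ++ [x]) ++ l.set 1 pvRED).length : Int) ∧ PySem.List.slice ((e' ++ [x]) ++ l.set 1 pvRED) (some ((e'.length : Int) + 1 + 1)) (some ((e'.length : Int) + 1 + 3)) = ["dav", "files"]) := by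
      rintro ⟨ha, _, _⟩; exact absurd (ha ▸ hc1.1) (by decide)
    rw [if_neg hns', if_neg hns]
  · rw [if_neg (fun h => hc1 (hcond1.mp h)), if_neg hc1]
    have hcond2 : (a = "public.php" ∧ (e'.length : Int) + 1 + 3 < (((e' ++ [x]) ++ l).length : Int) ∧ PySem.List.slice ((e' ++ [x]) ++ l) (some ((e'.length : Int) + 1 + 1)) (some ((e'.length : Int) + 1 + 3)) = ["dav", "files"])
        ↔ (a = "public.php" ∧ 3 < l.length ∧ (l.drop 1).take 2 = ["dav", "files"]) := by
      rw [hslice, hlen]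
      constructor
      · rintro ⟨h1, h2, h3⟩; exact ⟨h1, by omega, h3⟩
      · rintro ⟨h1, h2, h3⟩; exact ⟨h1, by omega, h3⟩
    by_cases hc2 : a = "public.php" ∧ 3 < l.length ∧ (l.drop 1).take 2 = ["dav", "files"]
    · rw [if_pos (hcond2.mpr hc2), if_pos hc2, hset3]
    · rw [if_neg (fun h => hc2 (hcond2.mp h)), if_neg hc2]

lemma pvMap_eq (p1 : Option String) (r1 : Bool) :
    (p1.map (pvMark r1) = some "index.php") ↔ (p1 = some "index.php" ∧ r1 = false) := by
  cases p1 with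
  | none => simp
  | some v => cases r1 <;> simp [pvMark, pvRED]

lemma stepLocal_markhead (a b : String) (t : List String) (p3 p2 p1 : Option String) (r2 r1 : Bool) :
    stepLocal (p1.map (pvMark r1)) a (pvMarkHead (a :: b :: t) p3 p2 p1 r2)
    = pvMark (pvRedB p3 p2 p1 r2) a :: pvMarkHead (b :: t) p2 p1 (some a) r1 := by
  have hmap := pvMap_eq p1 r1
  cases t with
  | nil =>
    unfold stepLocal pvMarkHead
    dsimp only
    split_ifs with h1 h2 h3 <;>
      simp_all [pvMark, pvRedB, pvPub, List.set]
    have hno : ¬ ((p1 = some "index.php" ∧ a = "s") ∧ r1 = false) := by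
      rintro ⟨⟨hp, ha⟩, hr⟩; exact absurd (h1 ha hp) (by simp [hr])
    simp [hno]
  | cons c u =>
    cases u with
    | nil =>
      unfold stepLocal pvMarkHead
      dsimp only
      split_ifs with h1 h2 h3 <;>
        simp_all [pvMark, pvRedB, pvPub, List.set]
      have hno : ¬ ((p1 = some "index.php" ∧ a = "s") ∧ r1 = false) := by
        rintro ⟨⟨hp, ha⟩, hr⟩; exact absurd (h1 ha hp) (by simp [hr])
      simp [hno]
    | cons d v =>
      unfold stepLocal pvMarkHead
      dsimp only
      split_ifs with h1 h2 h3 <;>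
        simp_all [pvMark, pvRedB, pvPub, List.set]
      · obtain ⟨ha, hb, hc⟩ := h3
        rw [if_neg (by rintro ⟨-, h⟩; rw [ha] at h; exact absurd h (by decide))] at hb
        rw [if_neg (by rintro ⟨⟨-, h⟩, -⟩; rw [ha] at h; exact absurd h (by decide))] at hc
        intro h; exact absurd hc (h hb)
      · have hno : ¬ ((p1 = some "index.php" ∧ a = "s") ∧ r1 = false) := by
          rintro ⟨⟨hp, ha⟩, hr⟩; exact absurd (h1 ha hp) (by simp [hr])
        simp [hno]

lemma pvStep (emitted : List String) (a b : String) (t : List String)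
    (p3 p2 p1 : Option String) (r2 r1 : Bool) (hctx : pvCtxOK emitted p1 r1) :
    redactStepA (emitted ++ pvMarkHead (a :: b :: t) p3 p2 p1 r2) ((emitted.length : Int), a)
    = (emitted ++ [pvMark (pvRedB p3 p2 p1 r2) a]) ++ pvMarkHead (b :: t) p2 p1 (some a) r1 := by
  have key : redactStepA (emitted ++ pvMarkHead (a :: b :: t) p3 p2 p1 r2) ((emitted.length : Int), a)
      = emitted ++ stepLocal (p1.map (pvMark r1)) a (pvMarkHead (a :: b :: t) p3 p2 p1 r2) := by
    cases p1 with
    | none =>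
      have he : emitted = [] := hctx
      subst he
      simpa using stepA_nil a (pvMarkHead (a :: b :: t) p3 p2 none r2)
    | some v =>
      have hlast : emitted.getLast? = some (pvMark r1 v) := hctx
      obtain ⟨e', he⟩ := List.getLast?_eq_some_iff.mp hlast
      subst he
      have hlen : ((e' ++ [pvMark r1 v]).length : Int) = (e'.length : Int) + 1 := by simp
      rw [hlen]
      exact stepA_append e' (pvMark r1 v) a (pvMarkHead (a :: b :: t) p3 p2 (some v) r2)
  rw [key, stepLocal_markhead]
  simp

lemma pvMain (rest : List String) : ∀ (emitted : List String) (p3 p2 p1 : Option String) (r2 r1 : Bool),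
    pvCtxOK emitted p1 r1 →
    List.foldl redactStepA (emitted ++ pvMarkHead rest p3 p2 p1 r2)
      (PySem.List.enumerate rest.dropLast (emitted.length : Int))
    = emitted ++ redactGo rest p3 p2 p1 r2 r1 := by
  induction rest with
  | nil => intro emitted p3 p2 p1 r2 r1 _; simp [pvMarkHead, redactGo]
  | cons a rest' ih =>
    intro emitted p3 p2 p1 r2 r1 hctx
    cases rest' with
    | nil => simp [pvMarkHead, redactGo, pvRedB, pvMark]
    | cons b t =>
      rw [List.dropLast_cons₂, PySem.List.enumerate_cons, List.foldl_cons, pvStep emitted a b t p3 p2 p1 r2 r1 hctx]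
      have hctx' : pvCtxOK (emitted ++ [pvMark (pvRedB p3 p2 p1 r2) a]) (some a) (pvRedB p3 p2 p1 r2) := by
        simp [pvCtxOK]
      have hlen : ((emitted.length : Int) + 1) = (((emitted ++ [pvMark (pvRedB p3 p2 p1 r2) a]).length : Nat) : Int) := by
        simp
      rw [hlen, ih (emitted ++ [pvMark (pvRedB p3 p2 p1 r2) a]) p2 p1 (some a) r1 (pvRedB p3 p2 p1 r2) hctx']
      simp [redactGo, pvRedB, pvMark]

lemma pvMarkHead_none (xs : List String) : pvMarkHead xs none none none false = xs := by
  match xs with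
  | [] => rfl
  | [a] => simp [pvMarkHead, pvRedB, pvMark]
  | [a, b] => simp [pvMarkHead, pvRedB, pvPub, pvMark]
  | a :: b :: c :: v => simp [pvMarkHead, pvRedB, pvPub, pvMark]

-- ===== VERDICT (by name: the statement is the Claim_ definition above) =====
theorem redact_sensitive_path_py_spec : Claim_equal_redact_sensitive_path_py := by
  intro path _
  unfold Spec_redact_sensitive_path_py redact_sensitive_path_py redact_sensitive_path_py_alt
  have h := pvMain ((PySem.Str.split? path "/").getD []) [] none none none false false rfl
  simp only [List.nil_append, List.length_nil, Int.natCast_zero, pvMarkHead_none] at h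
  simp only [PySem.List.slice_to_neg_one]
  rw [h]
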